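-- pv_equiv track=rewrite | github.com/j-greig/wibandwob-dos-tvision | tools/api_server/gallery.py | _text_to_pixel_positions
-- ===== SOURCE A (Python) =====
-- _PIXEL_FONT: dict[str, list[str]] = {
--     ' ': ["000","000","000","000","000"],
--     'A': ["010","101","111","101","101"],
--     'B': ["110","101","110","101","110"],
--     'C': ["011","100","100","100","011"],
--     'D': ["110","101","101","101","110"],
--     'E': ["111","100","110","100","111"],
--     'F': ["111","100","110","100","100"],
--     'G': ["011","100","101","101","011"],
--     'H': ["101","101","111","101","101"],
--     'I': ["111","010","010","010","111"],
--     'J': ["001","001","001","101","010"],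
--     'K': ["101","110","100","110","101"],
--     'L': ["100","100","100","100","111"],
--     'M': ["101","111","101","101","101"],
--     'N': ["101","110","101","101","101"],
--     'O': ["010","101","101","101","010"],
--     'P': ["110","101","110","100","100"],
--     'Q': ["010","101","101","011","001"],
--     'R': ["110","101","110","101","101"],
--     'S': ["011","100","010","001","110"],
--     'T': ["111","010","010","010","010"],
--     'U': ["101","101","101","101","011"],
--     'V': ["101","101","101","010","010"],
--     'W': ["101","101","111","111","101"],
--     'X': ["101","101","010","101","101"],
--     'Y': ["101","101","010","010","010"],
--     'Z': ["111","001","010","100","111"],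
--     '0': ["010","101","101","101","010"],
--     '1': ["010","110","010","010","111"],
--     '2': ["110","001","010","100","111"],
--     '3': ["110","001","010","001","110"],
--     '4': ["101","101","111","001","001"],
--     '5': ["111","100","110","001","110"],
--     '6': ["011","100","110","101","010"],
--     '7': ["111","001","010","010","010"],
--     '8': ["010","101","010","101","010"],
--     '9': ["010","101","011","001","110"],
--     '!': ["010","010","010","000","010"],
--     '?': ["110","001","010","000","010"],
--     '&': ["010","101","010","101","011"],
--     '#': ["101","111","101","111","101"],
--     '+': ["000","010","111","010","000"],
--     '-': ["000","000","111","000","000"],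
--     '.': ["000","000","000","000","010"],
--     '*': ["101","010","111","010","101"],
--     ':': ["000","010","000","010","000"],
-- }
--
-- def _text_to_pixel_positions(text: str, dot_size: int = 1) -> list[tuple[int, int]]:
--     """Return (col, row) pixel positions for `text` in 3×5 font.
--
--     Multi-line via '|' separator, 2-row gap between lines.
--     Unknown chars → space.
--     scale: each dot becomes a scale×scale block of positions.
--     """
--     positions: list[tuple[int, int]] = []
--     char_w   = 3 * dot_size
--     gap      = max(1, dot_size)        # gap between chars scales too
--     line_gap = max(2, dot_size * 2)    # gap between lines
--     line_height = 5 * dot_size + line_gap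
--     for line_idx, line in enumerate(text.upper().split('|')):
--         cursor_x = 0
--         y_offset  = line_idx * line_height
--         for ch in line:
--             rows = _PIXEL_FONT.get(ch, _PIXEL_FONT[' '])
--             for row_idx, row in enumerate(rows):
--                 for col_idx, bit in enumerate(row):
--                     if bit == '1':
--                         # expand each font pixel into dot_size×dot_size primer windows
--                         bx = cursor_x + col_idx * dot_size
--                         by = y_offset + row_idx * dot_size
--                         for dy in range(dot_size):
--                             for dx in range(dot_size):
--                                 positions.append((bx + dx, by + dy))
--             cursor_x += char_w + gap
--     return positions
-- ===== SOURCE B (Python) =====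
-- # Glyphs stored directly as set-pixel (col,row) coordinate lists; positions emitted
-- # in one flat comprehension with closed-form cursor arithmetic (no running cursor).
-- _COORDS: dict[str, list[tuple[int, int]]] = {
--     ' ': [],
--     'A': [(1, 0), (0, 1), (2, 1), (0, 2), (1, 2), (2, 2), (0, 3), (2, 3), (0, 4), (2, 4)],
--     'B': [(0, 0), (1, 0), (0, 1), (2, 1), (0, 2), (1, 2), (0, 3), (2, 3), (0, 4), (1, 4)],
--     'C': [(1, 0), (2, 0), (0, 1), (0, 2), (0, 3), (1, 4), (2, 4)],
--     'D': [(0, 0), (1, 0), (0, 1), (2, 1), (0, 2), (2, 2), (0, 3), (2, 3), (0, 4), (1, 4)],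
--     'E': [(0, 0), (1, 0), (2, 0), (0, 1), (0, 2), (1, 2), (0, 3), (0, 4), (1, 4), (2, 4)],
--     'F': [(0, 0), (1, 0), (2, 0), (0, 1), (0, 2), (1, 2), (0, 3), (0, 4)],
--     'G': [(1, 0), (2, 0), (0, 1), (0, 2), (2, 2), (0, 3), (2, 3), (1, 4), (2, 4)],
--     'H': [(0, 0), (2, 0), (0, 1), (2, 1), (0, 2), (1, 2), (2, 2), (0, 3), (2, 3), (0, 4), (2, 4)],
--     'I': [(0, 0), (1, 0), (2, 0), (1, 1), (1, 2), (1, 3), (0, 4), (1, 4), (2, 4)],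
--     'J': [(2, 0), (2, 1), (2, 2), (0, 3), (2, 3), (1, 4)],
--     'K': [(0, 0), (2, 0), (0, 1), (1, 1), (0, 2), (0, 3), (1, 3), (0, 4), (2, 4)],
--     'L': [(0, 0), (0, 1), (0, 2), (0, 3), (0, 4), (1, 4), (2, 4)],
--     'M': [(0, 0), (2, 0), (0, 1), (1, 1), (2, 1), (0, 2), (2, 2), (0, 3), (2, 3), (0, 4), (2, 4)],
--     'N': [(0, 0), (2, 0), (0, 1), (1, 1), (0, 2), (2, 2), (0, 3), (2, 3), (0, 4), (2, 4)],
--     'O': [(1, 0), (0, 1), (2, 1), (0, 2), (2, 2), (0, 3), (2, 3), (1, 4)],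
--     'P': [(0, 0), (1, 0), (0, 1), (2, 1), (0, 2), (1, 2), (0, 3), (0, 4)],
--     'Q': [(1, 0), (0, 1), (2, 1), (0, 2), (2, 2), (1, 3), (2, 3), (2, 4)],
--     'R': [(0, 0), (1, 0), (0, 1), (2, 1), (0, 2), (1, 2), (0, 3), (2, 3), (0, 4), (2, 4)],
--     'S': [(1, 0), (2, 0), (0, 1), (1, 2), (2, 3), (0, 4), (1, 4)],
--     'T': [(0, 0), (1, 0), (2, 0), (1, 1), (1, 2), (1, 3), (1, 4)],
--     'U': [(0, 0), (2, 0), (0, 1), (2, 1), (0, 2), (2, 2), (0, 3), (2, 3), (1, 4), (2, 4)],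
--     'V': [(0, 0), (2, 0), (0, 1), (2, 1), (0, 2), (2, 2), (1, 3), (1, 4)],
--     'W': [(0, 0), (2, 0), (0, 1), (2, 1), (0, 2), (1, 2), (2, 2), (0, 3), (1, 3), (2, 3), (0, 4), (2, 4)],
--     'X': [(0, 0), (2, 0), (0, 1), (2, 1), (1, 2), (0, 3), (2, 3), (0, 4), (2, 4)],
--     'Y': [(0, 0), (2, 0), (0, 1), (2, 1), (1, 2), (1, 3), (1, 4)],
--     'Z': [(0, 0), (1, 0), (2, 0), (2, 1), (1, 2), (0, 3), (0, 4), (1, 4), (2, 4)],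
--     '0': [(1, 0), (0, 1), (2, 1), (0, 2), (2, 2), (0, 3), (2, 3), (1, 4)],
--     '1': [(1, 0), (0, 1), (1, 1), (1, 2), (1, 3), (0, 4), (1, 4), (2, 4)],
--     '2': [(0, 0), (1, 0), (2, 1), (1, 2), (0, 3), (0, 4), (1, 4), (2, 4)],
--     '3': [(0, 0), (1, 0), (2, 1), (1, 2), (2, 3), (0, 4), (1, 4)],
--     '4': [(0, 0), (2, 0), (0, 1), (2, 1), (0, 2), (1, 2), (2, 2), (2, 3), (2, 4)],
--     '5': [(0, 0), (1, 0), (2, 0), (0, 1), (0, 2), (1, 2), (2, 3), (0, 4), (1, 4)],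
--     '6': [(1, 0), (2, 0), (0, 1), (0, 2), (1, 2), (0, 3), (2, 3), (1, 4)],
--     '7': [(0, 0), (1, 0), (2, 0), (2, 1), (1, 2), (1, 3), (1, 4)],
--     '8': [(1, 0), (0, 1), (2, 1), (1, 2), (0, 3), (2, 3), (1, 4)],
--     '9': [(1, 0), (0, 1), (2, 1), (1, 2), (2, 2), (2, 3), (0, 4), (1, 4)],
--     '!': [(1, 0), (1, 1), (1, 2), (1, 4)],
--     '?': [(0, 0), (1, 0), (2, 1), (1, 2), (1, 4)],
--     '&': [(1, 0), (0, 1), (2, 1), (1, 2), (0, 3), (2, 3), (1, 4), (2, 4)],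
--     '#': [(0, 0), (2, 0), (0, 1), (1, 1), (2, 1), (0, 2), (2, 2), (0, 3), (1, 3), (2, 3), (0, 4), (2, 4)],
--     '+': [(1, 1), (0, 2), (1, 2), (2, 2), (1, 3)],
--     '-': [(0, 2), (1, 2), (2, 2)],
--     '.': [(1, 4)],
--     '*': [(0, 0), (2, 0), (1, 1), (0, 2), (1, 2), (2, 2), (1, 3), (0, 4), (2, 4)],
--     ':': [(1, 1), (1, 3)],
-- }
--
--
-- def _text_to_pixel_positions(text: str, dot_size: int = 1) -> list[tuple[int, int]]:
--     """Return (col, row) pixel positions for `text` in 3×5 font (same contract as A)."""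
--     pitch = 3 * dot_size + max(1, dot_size)
--     line_height = 5 * dot_size + max(2, dot_size * 2)
--     return [
--         (ci * pitch + c * dot_size + dx, li * line_height + r * dot_size + dy)
--         for li, line in enumerate(text.upper().split('|'))
--         for ci, ch in enumerate(line)
--         for c, r in _COORDS.get(ch, [])
--         for dy in range(dot_size)
--         for dx in range(dot_size)
--     ]
-- ===== Notes on version B (the rewrite author's own statement) =====
-- stated objective: idiomatic
-- what changed: B replaces the bit-string font with a table storing each glyph directly as its list of set-pixel (col,row) coordinates and emits all positions in one flat comprehension with closed-form cursor arithmetic (ci*pitch, li*line_height), eliminating A's call-time bit scanning, running cursor and mutable accumulator.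
import Mathlib
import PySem

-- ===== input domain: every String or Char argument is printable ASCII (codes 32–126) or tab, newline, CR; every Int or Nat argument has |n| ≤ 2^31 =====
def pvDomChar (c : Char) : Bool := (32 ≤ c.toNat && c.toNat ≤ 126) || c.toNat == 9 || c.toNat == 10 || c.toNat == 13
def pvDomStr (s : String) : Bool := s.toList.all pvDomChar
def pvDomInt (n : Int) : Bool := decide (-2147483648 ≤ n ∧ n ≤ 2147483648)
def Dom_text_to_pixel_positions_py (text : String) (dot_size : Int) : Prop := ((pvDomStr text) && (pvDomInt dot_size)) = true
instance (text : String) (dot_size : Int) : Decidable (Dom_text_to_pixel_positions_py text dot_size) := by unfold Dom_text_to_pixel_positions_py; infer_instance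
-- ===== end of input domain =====

-- B stores each glyph directly as its list of set-pixel (col,row) coordinates and emits all
-- positions in one flat comprehension with closed-form cursor arithmetic (idiomatic; same cost).

-- ===== PORT A =====
-- the module-level _PIXEL_FONT table of A
def pvFont : PySem.Dict Char (List String) := PySem.Dict.ofList [
  (' ', ["000", "000", "000", "000", "000"]),
  ('A', ["010", "101", "111", "101", "101"]),
  ('B', ["110", "101", "110", "101", "110"]),
  ('C', ["011", "100", "100", "100", "011"]),
  ('D', ["110", "101", "101", "101", "110"]),
  ('E', ["111", "100", "110", "100", "111"]),
  ('F', ["111", "100", "110", "100", "100"]),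
  ('G', ["011", "100", "101", "101", "011"]),
  ('H', ["101", "101", "111", "101", "101"]),
  ('I', ["111", "010", "010", "010", "111"]),
  ('J', ["001", "001", "001", "101", "010"]),
  ('K', ["101", "110", "100", "110", "101"]),
  ('L', ["100", "100", "100", "100", "111"]),
  ('M', ["101", "111", "101", "101", "101"]),
  ('N', ["101", "110", "101", "101", "101"]),
  ('O', ["010", "101", "101", "101", "010"]),
  ('P', ["110", "101", "110", "100", "100"]),
  ('Q', ["010", "101", "101", "011", "001"]),
  ('R', ["110", "101", "110", "101", "101"]),
  ('S', ["011", "100", "010", "001", "110"]),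
  ('T', ["111", "010", "010", "010", "010"]),
  ('U', ["101", "101", "101", "101", "011"]),
  ('V', ["101", "101", "101", "010", "010"]),
  ('W', ["101", "101", "111", "111", "101"]),
  ('X', ["101", "101", "010", "101", "101"]),
  ('Y', ["101", "101", "010", "010", "010"]),
  ('Z', ["111", "001", "010", "100", "111"]),
  ('0', ["010", "101", "101", "101", "010"]),
  ('1', ["010", "110", "010", "010", "111"]),
  ('2', ["110", "001", "010", "100", "111"]),
  ('3', ["110", "001", "010", "001", "110"]),
  ('4', ["101", "101", "111", "001", "001"]),
  ('5', ["111", "100", "110", "001", "110"]),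
  ('6', ["011", "100", "110", "101", "010"]),
  ('7', ["111", "001", "010", "010", "010"]),
  ('8', ["010", "101", "010", "101", "010"]),
  ('9', ["010", "101", "011", "001", "110"]),
  ('!', ["010", "010", "010", "000", "010"]),
  ('?', ["110", "001", "010", "000", "010"]),
  ('&', ["010", "101", "010", "101", "011"]),
  ('#', ["101", "111", "101", "111", "101"]),
  ('+', ["000", "010", "111", "010", "000"]),
  ('-', ["000", "000", "111", "000", "000"]),
  ('.', ["000", "000", "000", "000", "010"]),
  ('*', ["101", "010", "111", "010", "101"]),
  (':', ["000", "010", "000", "010", "000"])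
]

-- text.upper().split('|'), each line as its list of characters ('|' is a nonempty
-- separator, so Python's split never raises; iterating a str iterates its chars)
def pvLines (text : String) : List (List Char) :=
  PySem.Chars.splitOn (PySem.Chars.upper text.toList) ['|']

def text_to_pixel_positions_py (text : String) (dot_size : Int) : List (Int × Int) :=
  let char_w := 3 * dot_size
  let gap := max 1 dot_size
  let line_gap := max 2 (dot_size * 2)
  let line_height := 5 * dot_size + line_gap
  (PySem.List.enumerate (pvLines text) 0).foldl
    (fun positions li_line =>
      let y_offset := li_line.1 * line_height
      (li_line.2.foldl
        (fun (st : List (Int × Int) × Int) ch =>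
          -- _PIXEL_FONT.get(ch, _PIXEL_FONT[' ']); the ' ' key is present in the
          -- table, so the [] default of its direct lookup is never used
          let rows := PySem.Dict.getD pvFont ch (PySem.Dict.getD pvFont ' ' [])
          let pos' :=
            (PySem.List.enumerate rows 0).foldl
              (fun positions ri_row =>
                (PySem.List.enumerate ri_row.2.toList 0).foldl
                  (fun positions ci_bit =>
                    if ci_bit.2 == '1' then
                      let bx := st.2 + ci_bit.1 * dot_size
                      let byy := y_offset + ri_row.1 * dot_size
                      (PySem.List.pyRange 0 dot_size 1).foldl
                        (fun positions dy =>
                          (PySem.List.pyRange 0 dot_size 1).foldl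
                            (fun positions dx => positions ++ [(bx + dx, byy + dy)])
                            positions)
                        positions
                    else positions)
                  positions)
              st.1
          (pos', st.2 + char_w + gap))
        (positions, 0)).1)
    []

-- ===== PORT B =====
-- B's module-level _COORDS table: each glyph as its literal list of set-pixel (col,row) pairs
def pvCoords : PySem.Dict Char (List (Int × Int)) := PySem.Dict.ofList [
  (' ', []),
  ('A', [(1, 0), (0, 1), (2, 1), (0, 2), (1, 2), (2, 2), (0, 3), (2, 3), (0, 4), (2, 4)]),
  ('B', [(0, 0), (1, 0), (0, 1), (2, 1), (0, 2), (1, 2), (0, 3), (2, 3), (0, 4), (1, 4)]),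
  ('C', [(1, 0), (2, 0), (0, 1), (0, 2), (0, 3), (1, 4), (2, 4)]),
  ('D', [(0, 0), (1, 0), (0, 1), (2, 1), (0, 2), (2, 2), (0, 3), (2, 3), (0, 4), (1, 4)]),
  ('E', [(0, 0), (1, 0), (2, 0), (0, 1), (0, 2), (1, 2), (0, 3), (0, 4), (1, 4), (2, 4)]),
  ('F', [(0, 0), (1, 0), (2, 0), (0, 1), (0, 2), (1, 2), (0, 3), (0, 4)]),
  ('G', [(1, 0), (2, 0), (0, 1), (0, 2), (2, 2), (0, 3), (2, 3), (1, 4), (2, 4)]),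
  ('H', [(0, 0), (2, 0), (0, 1), (2, 1), (0, 2), (1, 2), (2, 2), (0, 3), (2, 3), (0, 4), (2, 4)]),
  ('I', [(0, 0), (1, 0), (2, 0), (1, 1), (1, 2), (1, 3), (0, 4), (1, 4), (2, 4)]),
  ('J', [(2, 0), (2, 1), (2, 2), (0, 3), (2, 3), (1, 4)]),
  ('K', [(0, 0), (2, 0), (0, 1), (1, 1), (0, 2), (0, 3), (1, 3), (0, 4), (2, 4)]),
  ('L', [(0, 0), (0, 1), (0, 2), (0, 3), (0, 4), (1, 4), (2, 4)]),
  ('M', [(0, 0), (2, 0), (0, 1), (1, 1), (2, 1), (0, 2), (2, 2), (0, 3), (2, 3), (0, 4), (2, 4)]),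
  ('N', [(0, 0), (2, 0), (0, 1), (1, 1), (0, 2), (2, 2), (0, 3), (2, 3), (0, 4), (2, 4)]),
  ('O', [(1, 0), (0, 1), (2, 1), (0, 2), (2, 2), (0, 3), (2, 3), (1, 4)]),
  ('P', [(0, 0), (1, 0), (0, 1), (2, 1), (0, 2), (1, 2), (0, 3), (0, 4)]),
  ('Q', [(1, 0), (0, 1), (2, 1), (0, 2), (2, 2), (1, 3), (2, 3), (2, 4)]),
  ('R', [(0, 0), (1, 0), (0, 1), (2, 1), (0, 2), (1, 2), (0, 3), (2, 3), (0, 4), (2, 4)]),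
  ('S', [(1, 0), (2, 0), (0, 1), (1, 2), (2, 3), (0, 4), (1, 4)]),
  ('T', [(0, 0), (1, 0), (2, 0), (1, 1), (1, 2), (1, 3), (1, 4)]),
  ('U', [(0, 0), (2, 0), (0, 1), (2, 1), (0, 2), (2, 2), (0, 3), (2, 3), (1, 4), (2, 4)]),
  ('V', [(0, 0), (2, 0), (0, 1), (2, 1), (0, 2), (2, 2), (1, 3), (1, 4)]),
  ('W', [(0, 0), (2, 0), (0, 1), (2, 1), (0, 2), (1, 2), (2, 2), (0, 3), (1, 3), (2, 3), (0, 4), (2, 4)]),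
  ('X', [(0, 0), (2, 0), (0, 1), (2, 1), (1, 2), (0, 3), (2, 3), (0, 4), (2, 4)]),
  ('Y', [(0, 0), (2, 0), (0, 1), (2, 1), (1, 2), (1, 3), (1, 4)]),
  ('Z', [(0, 0), (1, 0), (2, 0), (2, 1), (1, 2), (0, 3), (0, 4), (1, 4), (2, 4)]),
  ('0', [(1, 0), (0, 1), (2, 1), (0, 2), (2, 2), (0, 3), (2, 3), (1, 4)]),
  ('1', [(1, 0), (0, 1), (1, 1), (1, 2), (1, 3), (0, 4), (1, 4), (2, 4)]),
  ('2', [(0, 0), (1, 0), (2, 1), (1, 2), (0, 3), (0, 4), (1, 4), (2, 4)]),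
  ('3', [(0, 0), (1, 0), (2, 1), (1, 2), (2, 3), (0, 4), (1, 4)]),
  ('4', [(0, 0), (2, 0), (0, 1), (2, 1), (0, 2), (1, 2), (2, 2), (2, 3), (2, 4)]),
  ('5', [(0, 0), (1, 0), (2, 0), (0, 1), (0, 2), (1, 2), (2, 3), (0, 4), (1, 4)]),
  ('6', [(1, 0), (2, 0), (0, 1), (0, 2), (1, 2), (0, 3), (2, 3), (1, 4)]),
  ('7', [(0, 0), (1, 0), (2, 0), (2, 1), (1, 2), (1, 3), (1, 4)]),
  ('8', [(1, 0), (0, 1), (2, 1), (1, 2), (0, 3), (2, 3), (1, 4)]),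
  ('9', [(1, 0), (0, 1), (2, 1), (1, 2), (2, 2), (2, 3), (0, 4), (1, 4)]),
  ('!', [(1, 0), (1, 1), (1, 2), (1, 4)]),
  ('?', [(0, 0), (1, 0), (2, 1), (1, 2), (1, 4)]),
  ('&', [(1, 0), (0, 1), (2, 1), (1, 2), (0, 3), (2, 3), (1, 4), (2, 4)]),
  ('#', [(0, 0), (2, 0), (0, 1), (1, 1), (2, 1), (0, 2), (2, 2), (0, 3), (1, 3), (2, 3), (0, 4), (2, 4)]),
  ('+', [(1, 1), (0, 2), (1, 2), (2, 2), (1, 3)]),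
  ('-', [(0, 2), (1, 2), (2, 2)]),
  ('.', [(1, 4)]),
  ('*', [(0, 0), (2, 0), (1, 1), (0, 2), (1, 2), (2, 2), (1, 3), (0, 4), (2, 4)]),
  (':', [(1, 1), (1, 3)])
]

def text_to_pixel_positions_py_alt (text : String) (dot_size : Int) : List (Int × Int) :=
  let pitch := 3 * dot_size + max 1 dot_size
  let line_height := 5 * dot_size + max 2 (dot_size * 2)
  (PySem.List.enumerate (pvLines text) 0).flatMap
    (fun li_line =>
      (PySem.List.enumerate li_line.2 0).flatMap (fun ci_ch =>
        (PySem.Dict.getD pvCoords ci_ch.2 []).flatMap (fun cr =>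
          (PySem.List.pyRange 0 dot_size 1).flatMap (fun dy =>
            (PySem.List.pyRange 0 dot_size 1).map (fun dx =>
              (ci_ch.1 * pitch + cr.1 * dot_size + dx,
               li_line.1 * line_height + cr.2 * dot_size + dy))))))

-- ===== PRECONDITION & SPEC =====
def Spec_text_to_pixel_positions_py (text : String) (dot_size : Int) (out : List (Int × Int)) : Prop := out = text_to_pixel_positions_py_alt text dot_size
instance (text : String) (dot_size : Int) (out : List (Int × Int)) : Decidable (Spec_text_to_pixel_positions_py text dot_size out) := by unfold Spec_text_to_pixel_positions_py; infer_instance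

-- ===== CLAIM (what is proved, stated in full; the proofs are below) =====
def Claim_equal_text_to_pixel_positions_py : Prop := ∀ (text : String) (dot_size : Int), Dom_text_to_pixel_positions_py text dot_size → Spec_text_to_pixel_positions_py text dot_size (text_to_pixel_positions_py text dot_size)

-- ===== LEMMAS AND PROOFS =====

-- the (col,row) coordinates of the '1' bits of a glyph's row strings, row-major (proof-side
-- characterisation of A's bit scan; B's table pvCoords holds exactly these lists as literals)
def pvCoordsOf (rows : List String) : List (Int × Int) :=
  (PySem.List.enumerate rows 0).flatMap (fun r_row =>
    (PySem.List.enumerate r_row.2.toList 0).filterMap (fun c_bit =>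
      if c_bit.2 == '1' then some (c_bit.1, r_row.1) else none))

lemma pv_filterMap_if {α β : Type} (p : α → Bool) (f : α → β) :
    ∀ (l : List α), l.filterMap (fun x => if p x then some (f x) else none) = (l.filter p).map f := by
  intro l
  induction l with
  | nil => rfl
  | cons x xs ih => by_cases h : p x <;> simp [h, ih]

lemma pv_foldl_append_if_flat {α β : Type} (p : α → Bool) (g : α → List β) :
    ∀ (l : List α) (acc : List β),
      l.foldl (fun a x => if p x then a ++ g x else a) acc = acc ++ (l.filter p).flatMap g := by
  intro l
  induction l with
  | nil => simp
  | cons x xs ih => intro acc; by_cases h : p x <;> simp [h, ih]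

lemma pv_flatMap_funcongr {α β : Type} (f g : α → List β) (l : List α)
    (h : ∀ x, f x = g x) : l.flatMap f = l.flatMap g := by
  rw [funext h]

lemma pv_enum_shift {α β : Type} :
    ∀ (l : List α) (f : Int → α → List β) (s : Int),
      (PySem.List.enumerate l s).flatMap (fun ic => f ic.1 ic.2)
        = (PySem.List.enumerate l 0).flatMap (fun ic => f (s + ic.1) ic.2) := by
  intro l
  induction l with
  | nil => intro f s; simp [PySem.List.enumerate_nil]
  | cons x xs ih =>
      intro f s
      rw [PySem.List.enumerate_cons, PySem.List.enumerate_cons]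
      simp only [List.flatMap_cons]
      simp only [zero_add]
      rw [ih f (s + 1), ih (fun i a => f (s + i) a) 1]
      simp only [add_zero]
      congr 1
      apply pv_flatMap_funcongr
      intro ic
      congr 1
      ring

lemma pv_cursor_loop {α : Type} (g : List (Int × Int) → Int → α → List (Int × Int))
    (contrib : Int → α → List (Int × Int)) (d : Int)
    (hg : ∀ p cx ch, g p cx ch = p ++ contrib cx ch) :
    ∀ (cs : List α) (p : List (Int × Int)) (cx : Int),
      (cs.foldl (fun st ch => (g st.1 st.2 ch, st.2 + d)) (p, cx)).1
        = p ++ (PySem.List.enumerate cs 0).flatMap (fun ic => contrib (cx + ic.1 * d) ic.2) := by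
  intro cs
  induction cs with
  | nil => simp [PySem.List.enumerate_nil]
  | cons c cs ih =>
      intro p cx
      simp only [List.foldl_cons]
      rw [ih, hg]
      rw [PySem.List.enumerate_cons, List.flatMap_cons]
      simp only [zero_add]
      rw [pv_enum_shift cs (fun i ch => contrib (cx + i * d) ch) 1]
      simp only [zero_mul, add_zero, List.append_assoc]
      congr 1
      congr 1
      apply pv_flatMap_funcongr
      intro ic
      congr 1
      ring

def pvBlk (ds bx byy : Int) : List (Int × Int) :=
  (PySem.List.pyRange 0 ds 1).flatMap (fun dy =>
    (PySem.List.pyRange 0 ds 1).map (fun dx => (bx + dx, byy + dy)))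

lemma pvBlk_foldl (ds bx byy : Int) (p : List (Int × Int)) :
    (PySem.List.pyRange 0 ds 1).foldl
      (fun q dy => (PySem.List.pyRange 0 ds 1).foldl (fun q2 dx => q2 ++ [(bx + dx, byy + dy)]) q) p
    = p ++ pvBlk ds bx byy := by
  have h : (fun (q : List (Int × Int)) (dy : Int) =>
      (PySem.List.pyRange 0 ds 1).foldl (fun q2 dx => q2 ++ [(bx + dx, byy + dy)]) q)
      = fun q dy => q ++ (PySem.List.pyRange 0 ds 1).map (fun dx => (bx + dx, byy + dy)) := by
    funext q dy
    exact PySem.List.foldl_append_singleton_eq_map _ _ _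
  rw [h, PySem.List.foldl_append_eq_flatMap]
  rfl

-- A's scan of one character's glyph rows appends exactly the blocks of its coordinate list
lemma pv_char_cell (ds cx yoff : Int) (rows : List String) (p : List (Int × Int)) :
    (PySem.List.enumerate rows 0).foldl
      (fun positions ri_row =>
        (PySem.List.enumerate ri_row.2.toList 0).foldl
          (fun positions ci_bit =>
            if ci_bit.2 == '1' then
              (PySem.List.pyRange 0 ds 1).foldl
                (fun positions dy =>
                  (PySem.List.pyRange 0 ds 1).foldl
                    (fun positions dx =>
                      positions ++ [(cx + ci_bit.1 * ds + dx, yoff + ri_row.1 * ds + dy)])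
                    positions)
                positions
            else positions)
          positions)
      p
    = p ++ (pvCoordsOf rows).flatMap
        (fun cr => pvBlk ds (cx + cr.1 * ds) (yoff + cr.2 * ds)) := by
  have hrow : ∀ (q : List (Int × Int)) (ri_row : Int × String),
      (PySem.List.enumerate ri_row.2.toList 0).foldl
        (fun positions ci_bit =>
          if ci_bit.2 == '1' then
            (PySem.List.pyRange 0 ds 1).foldl
              (fun positions dy =>
                (PySem.List.pyRange 0 ds 1).foldl
                  (fun positions dx =>
                    positions ++ [(cx + ci_bit.1 * ds + dx, yoff + ri_row.1 * ds + dy)])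
                  positions)
              positions
          else positions)
        q
      = q ++ ((PySem.List.enumerate ri_row.2.toList 0).filter (fun cb => cb.2 == '1')).flatMap
          (fun cb => pvBlk ds (cx + cb.1 * ds) (yoff + ri_row.1 * ds)) := by
    intro q rr
    have h : (fun (positions : List (Int × Int)) (ci_bit : Int × Char) =>
        if ci_bit.2 == '1' then
          (PySem.List.pyRange 0 ds 1).foldl
            (fun positions dy =>
              (PySem.List.pyRange 0 ds 1).foldl
                (fun positions dx =>
                  positions ++ [(cx + ci_bit.1 * ds + dx, yoff + rr.1 * ds + dy)])
                positions)
            positions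
        else positions)
        = fun positions ci_bit =>
            if (fun (cb : Int × Char) => cb.2 == '1') ci_bit then
              positions ++ pvBlk ds (cx + ci_bit.1 * ds) (yoff + rr.1 * ds)
            else positions := by
      funext q2 cb
      by_cases hc : cb.2 == '1'
      · simp only [hc, if_true, pvBlk_foldl]
      · simp only [hc]; rfl
    rw [h, pv_foldl_append_if_flat]
  have h2 : (fun (positions : List (Int × Int)) (ri_row : Int × String) =>
      (PySem.List.enumerate ri_row.2.toList 0).foldl
        (fun positions ci_bit =>
          if ci_bit.2 == '1' then
            (PySem.List.pyRange 0 ds 1).foldl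
              (fun positions dy =>
                (PySem.List.pyRange 0 ds 1).foldl
                  (fun positions dx =>
                    positions ++ [(cx + ci_bit.1 * ds + dx, yoff + ri_row.1 * ds + dy)])
                  positions)
              positions
          else positions)
        positions)
      = fun positions ri_row => positions ++
          ((PySem.List.enumerate ri_row.2.toList 0).filter (fun cb => cb.2 == '1')).flatMap
            (fun cb => pvBlk ds (cx + cb.1 * ds) (yoff + ri_row.1 * ds)) := by
    funext q rr; exact hrow q rr
  rw [h2, PySem.List.foldl_append_eq_flatMap]
  congr 1
  unfold pvCoordsOf
  rw [List.flatMap_assoc]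
  apply pv_flatMap_funcongr
  intro rr
  simp only [pv_filterMap_if, List.flatMap_map]

-- B's literal table holds, per character, exactly the coordinates A's bit scan visits
lemma pv_get?_mapval {ν ν' : Type} (f : ν → ν') :
    ∀ (l : List (Char × ν)) (x : Char),
      (PySem.Dict.mk (l.map (fun kv => (kv.1, f kv.2)))).get? x
        = ((PySem.Dict.mk l).get? x).map f := by
  intro l
  induction l with
  | nil => intro x; rfl
  | cons kv rest ih =>
      intro x
      simp only [List.map_cons]
      rw [PySem.Dict.get?_mk_cons, PySem.Dict.get?_mk_cons]
      by_cases h : kv.1 == x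
      · simp [h]
      · simp [h, ih]

set_option maxRecDepth 100000 in
set_option maxHeartbeats 4000000 in
lemma pv_get_coords (ch : Char) :
    PySem.Dict.getD pvCoords ch []
      = pvCoordsOf (PySem.Dict.getD pvFont ch (PySem.Dict.getD pvFont ' ' [])) := by
  have hd : ∀ {ν : Type} (d : PySem.Dict Char ν) (k : Char) (v : ν),
      PySem.Dict.getD d k v = (PySem.Dict.get? d k).getD v := fun d k v => rfl
  rw [hd, hd]
  -- B's literal _COORDS table is exactly the font table with each glyph's bit rows
  -- replaced by its (col,row) coordinate list: one closed finite check
  have e : pvCoords = PySem.Dict.mk (pvFont.items.map (fun kv => (kv.1, pvCoordsOf kv.2))) := by decide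
  rw [e]
  have hcoords : (PySem.Dict.mk (pvFont.items.map (fun kv => (kv.1, pvCoordsOf kv.2)))).get? ch
      = (pvFont.get? ch).map pvCoordsOf := pv_get?_mapval pvCoordsOf pvFont.items ch
  rw [hcoords]
  cases hfc : pvFont.get? ch with
  | none =>
      simp only [Option.map_none, Option.getD_none]
      have hsp : pvCoordsOf (PySem.Dict.getD pvFont ' ' []) = [] := by rfl
      rw [hd] at hsp
      exact hsp.symm
  | some rows => simp

-- ===== VERDICT (by name: the statement is the Claim_ definition above) =====
set_option maxRecDepth 100000 in
theorem text_to_pixel_positions_py_spec : Claim_equal_text_to_pixel_positions_py := by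
  intro text ds hdom
  unfold Spec_text_to_pixel_positions_py
  simp only [text_to_pixel_positions_py, text_to_pixel_positions_py_alt]
  have hline : ∀ (positions : List (Int × Int)) (li_line : Int × List Char),
      (List.foldl
          (fun st ch =>
            (List.foldl
                  (fun positions ri_row =>
                    List.foldl
                      (fun positions ci_bit =>
                        if (ci_bit.2 == '1') = true then
                          List.foldl
                            (fun positions dy =>
                              List.foldl
                                (fun positions dx =>
                                  positions ++
                                    [(st.2 + ci_bit.1 * ds + dx,
                                        li_line.1 * (5 * ds + max 2 (ds * 2)) + ri_row.1 * ds + dy)])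
                                positions (PySem.List.pyRange 0 ds))
                            positions (PySem.List.pyRange 0 ds)
                        else positions)
                      positions (PySem.List.enumerate ri_row.2.toList))
                  st.1 (PySem.List.enumerate (pvFont.getD ch (pvFont.getD ' ' []))),
              st.2 + 3 * ds + max 1 ds))
          (positions, 0) li_line.2).1
      = positions ++ (PySem.List.enumerate li_line.2).flatMap (fun ci_ch =>
          (pvCoords.getD ci_ch.2 []).flatMap (fun cr =>
            (PySem.List.pyRange 0 ds 1).flatMap (fun dy =>
              (PySem.List.pyRange 0 ds 1).map (fun dx =>
                (ci_ch.1 * (3 * ds + max 1 ds) + cr.1 * ds + dx,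
                 li_line.1 * (5 * ds + max 2 (ds * 2)) + cr.2 * ds + dy))))) := by
    intro positions li_line
    have hg : ∀ (p : List (Int × Int)) (cx : Int) (ch : Char),
        (List.foldl
                  (fun positions ri_row =>
                    List.foldl
                      (fun positions ci_bit =>
                        if (ci_bit.2 == '1') = true then
                          List.foldl
                            (fun positions dy =>
                              List.foldl
                                (fun positions dx =>
                                  positions ++
                                    [(cx + ci_bit.1 * ds + dx,
                                        li_line.1 * (5 * ds + max 2 (ds * 2)) + ri_row.1 * ds + dy)])
                                positions (PySem.List.pyRange 0 ds))
                            positions (PySem.List.pyRange 0 ds)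
                        else positions)
                      positions (PySem.List.enumerate ri_row.2.toList))
                  p (PySem.List.enumerate (pvFont.getD ch (pvFont.getD ' ' []))))
        = p ++ (pvCoordsOf (pvFont.getD ch (pvFont.getD ' ' []))).flatMap
            (fun cr => pvBlk ds (cx + cr.1 * ds)
              (li_line.1 * (5 * ds + max 2 (ds * 2)) + cr.2 * ds)) := by
      intro p cx ch
      exact pv_char_cell ds cx (li_line.1 * (5 * ds + max 2 (ds * 2)))
        (pvFont.getD ch (pvFont.getD ' ' [])) p
    have hstep : (fun (st : List (Int × Int) × Int) (ch : Char) =>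
          (List.foldl
                  (fun positions ri_row =>
                    List.foldl
                      (fun positions ci_bit =>
                        if (ci_bit.2 == '1') = true then
                          List.foldl
                            (fun positions dy =>
                              List.foldl
                                (fun positions dx =>
                                  positions ++
                                    [(st.2 + ci_bit.1 * ds + dx,
                                        li_line.1 * (5 * ds + max 2 (ds * 2)) + ri_row.1 * ds + dy)])
                                positions (PySem.List.pyRange 0 ds))
                            positions (PySem.List.pyRange 0 ds)
                        else positions)
                      positions (PySem.List.enumerate ri_row.2.toList))
                  st.1 (PySem.List.enumerate (pvFont.getD ch (pvFont.getD ' ' []))),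
            st.2 + 3 * ds + max 1 ds))
        = fun st ch =>
            ((fun (p : List (Int × Int)) (cx : Int) (ch : Char) =>
                List.foldl
                  (fun positions ri_row =>
                    List.foldl
                      (fun positions ci_bit =>
                        if (ci_bit.2 == '1') = true then
                          List.foldl
                            (fun positions dy =>
                              List.foldl
                                (fun positions dx =>
                                  positions ++
                                    [(cx + ci_bit.1 * ds + dx,
                                        li_line.1 * (5 * ds + max 2 (ds * 2)) + ri_row.1 * ds + dy)])
                                positions (PySem.List.pyRange 0 ds))
                            positions (PySem.List.pyRange 0 ds)
                        else positions)
                      positions (PySem.List.enumerate ri_row.2.toList))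
                  p (PySem.List.enumerate (pvFont.getD ch (pvFont.getD ' ' [])))) st.1 st.2 ch,
             st.2 + (3 * ds + max 1 ds)) := by
      funext st ch
      rw [Prod.mk.injEq]
      exact ⟨rfl, by ring⟩
    rw [hstep, pv_cursor_loop _ _ _ hg]
    congr 1
    apply pv_flatMap_funcongr
    intro ic
    rw [pv_get_coords]
    apply pv_flatMap_funcongr
    intro cr
    unfold pvBlk
    simp only [zero_add]
  have hout : (fun (positions : List (Int × Int)) (li_line : Int × List Char) =>
      (List.foldl
          (fun st ch =>
            (List.foldl
                  (fun positions ri_row =>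
                    List.foldl
                      (fun positions ci_bit =>
                        if (ci_bit.2 == '1') = true then
                          List.foldl
                            (fun positions dy =>
                              List.foldl
                                (fun positions dx =>
                                  positions ++
                                    [(st.2 + ci_bit.1 * ds + dx,
                                        li_line.1 * (5 * ds + max 2 (ds * 2)) + ri_row.1 * ds + dy)])
                                positions (PySem.List.pyRange 0 ds))
                            positions (PySem.List.pyRange 0 ds)
                        else positions)
                      positions (PySem.List.enumerate ri_row.2.toList))
                  st.1 (PySem.List.enumerate (pvFont.getD ch (pvFont.getD ' ' []))),
              st.2 + 3 * ds + max 1 ds))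
          (positions, 0) li_line.2).1)
      = fun positions li_line => positions ++ (PySem.List.enumerate li_line.2).flatMap (fun ci_ch =>
          (pvCoords.getD ci_ch.2 []).flatMap (fun cr =>
            (PySem.List.pyRange 0 ds 1).flatMap (fun dy =>
              (PySem.List.pyRange 0 ds 1).map (fun dx =>
                (ci_ch.1 * (3 * ds + max 1 ds) + cr.1 * ds + dx,
                 li_line.1 * (5 * ds + max 2 (ds * 2)) + cr.2 * ds + dy))))) := by
    funext positions li_line
    exact hline positions li_line
  rw [hout, PySem.List.foldl_append_eq_flatMap]
  rw [List.nil_append]
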